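-- pv_equiv track=rewrite | github.com/IMSY-DKFZ/mcmlnet | mcmlnet/training/models/base_model.py | _find_reshape_factors
-- ===== SOURCE A (Python) =====
-- def _find_reshape_factors(
--     batch_length: int, min_first_dim: int = 5
-- ) -> tuple[int, int]:
--     """
--     Find two factors of batch_length where the first factor is >= min_first_dim.
--
--     Args:
--         batch_length: The total batch length to factorize
--         min_first_dim: Minimum value for the first dimension (default: 5)
--
--     Returns:
--         Tuple of (rows, cols) where rows >= min_first_dim
--             and rows * cols = batch_length
--     """
--     # Find all factors of batch_length
--     factors = []
--     for i in range(1, int(batch_length**0.5) + 1):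
--         if batch_length % i == 0:
--             factors.extend([i, batch_length // i])
--
--     # Remove duplicates and sort
--     factors = sorted(set(factors))
--
--     # Find the best pair where first factor >= min_first_dim
--     for factor in factors:
--         if factor >= min_first_dim:
--             complement = batch_length // factor
--             return factor, complement
--
--     # If no factor >= min_first_dim found, return the closest approximation
--     # Find the largest factor < min_first_dim and use min_first_dim if possible
--     if batch_length % min_first_dim == 0:
--         return min_first_dim, batch_length // min_first_dim
--
--     # Fallback: use the largest factor and its complement
--     return factors[-1], batch_length // factors[-1]
-- ===== SOURCE B (Python) =====
-- from math import isqrt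
--
--
-- def _find_reshape_factors(
--     batch_length: int, min_first_dim: int = 5
-- ) -> tuple[int, int]:
--     # Direct scan for the smallest divisor >= min_first_dim, in O(sqrt n):
--     # first look for it below sqrt(batch_length); failing that, look for its
--     # complement (the largest divisor <= batch_length // min_first_dim).
--     s = isqrt(batch_length) if batch_length > 0 else 0
--     for i in range(max(min_first_dim, 1), s + 1):
--         if batch_length % i == 0:
--             return i, batch_length // i
--     if min_first_dim >= 2 and batch_length >= 1:
--         for c in range(min(s, batch_length // min_first_dim), 0, -1):
--             if batch_length % c == 0:
--                 return batch_length // c, c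
--     if batch_length % min_first_dim == 0:
--         return min_first_dim, batch_length // min_first_dim
--     return batch_length, 1
-- ===== Notes on version B (the rewrite author's own statement) =====
-- stated objective: simpler
-- what changed: B drops A's collect-all-divisors/dedup/sort pipeline and directly searches for the smallest divisor >= min_first_dim: an ascending scan up to isqrt(batch_length), else a descending scan over complements bounded by min(isqrt, batch_length // min_first_dim), returning at the first hit; no factor list, set or sort is maintained.
import Mathlib
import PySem

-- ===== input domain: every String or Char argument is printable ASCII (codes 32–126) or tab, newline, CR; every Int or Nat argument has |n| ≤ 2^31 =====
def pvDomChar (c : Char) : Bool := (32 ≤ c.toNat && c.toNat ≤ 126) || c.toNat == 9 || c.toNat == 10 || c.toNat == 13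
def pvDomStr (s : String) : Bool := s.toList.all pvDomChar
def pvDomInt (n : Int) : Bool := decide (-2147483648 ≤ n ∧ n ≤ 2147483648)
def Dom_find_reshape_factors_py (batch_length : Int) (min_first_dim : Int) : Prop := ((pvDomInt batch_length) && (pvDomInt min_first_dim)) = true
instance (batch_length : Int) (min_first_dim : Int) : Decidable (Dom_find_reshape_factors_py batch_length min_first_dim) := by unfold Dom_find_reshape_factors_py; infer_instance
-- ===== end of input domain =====

-- B replaces A's build-all-divisors + dedup + sort + scan by a direct search for the
-- smallest divisor ≥ min_first_dim (scan up to sqrt, else scan complements downward).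

-- ===== PORT A =====
def find_reshape_factors_py (batch_length : Int) (min_first_dim : Int) : Int × Int :=
  -- int(batch_length ** 0.5) ported as Nat.sqrt: exact for 0 ≤ batch_length ≤ 2^31
  -- (negative batch_length raises TypeError in Python and is excluded by Pre_)
  let factors : List Int :=
    (PySem.List.pyRange 1 (((batch_length.toNat.sqrt : Int)) + 1) 1).foldl
      (fun acc i =>
        if PySem.Int.mod batch_length i = 0 then
          acc ++ [i, PySem.Int.floordiv batch_length i]
        else acc) []
  let sortedFactors := PySem.List.sorted (PySem.Set.ofList factors) (fun f => f)
  match sortedFactors.find? (fun f => decide (min_first_dim ≤ f)) with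
  | some factor => (factor, PySem.Int.floordiv batch_length factor)
  | none =>
    if PySem.Int.mod batch_length min_first_dim = 0 then
      (min_first_dim, PySem.Int.floordiv batch_length min_first_dim)
    else
      match PySem.List.pyGet? sortedFactors (-1) with
      | some f => (f, PySem.Int.floordiv batch_length f)
      | none => (0, 0)  -- IndexError: unreachable on inputs satisfying Pre_

-- ===== PORT B =====
def find_reshape_factors_py_alt (batch_length : Int) (min_first_dim : Int) : Int × Int :=
  let s : Int := if 0 < batch_length then (batch_length.toNat.sqrt : Int) else 0
  match (PySem.List.pyRange (max min_first_dim 1) (s + 1) 1).find?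
      (fun i => PySem.Int.mod batch_length i == 0) with
  | some i => (i, PySem.Int.floordiv batch_length i)
  | none =>
    match (if 2 ≤ min_first_dim ∧ 1 ≤ batch_length then
        (PySem.List.pyRange (min s (PySem.Int.floordiv batch_length min_first_dim)) 0 (-1)).find?
          (fun c => PySem.Int.mod batch_length c == 0)
      else none) with
    | some c => (PySem.Int.floordiv batch_length c, c)
    | none =>
      if PySem.Int.mod batch_length min_first_dim = 0 then
        (min_first_dim, PySem.Int.floordiv batch_length min_first_dim)
      else (batch_length, 1)

-- ===== PRECONDITION & SPEC =====
-- Pre_ excludes batch_length < 0 (A raises TypeError on int((-n)**0.5)) and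
-- batch_length = 0 with min_first_dim = 0 (A raises ZeroDivisionError on 0 % 0).
def Pre_find_reshape_factors_py (batch_length : Int) (min_first_dim : Int) : Prop :=
  0 ≤ batch_length ∧ (batch_length ≠ 0 ∨ min_first_dim ≠ 0)
instance (batch_length : Int) (min_first_dim : Int) : Decidable (Pre_find_reshape_factors_py batch_length min_first_dim) := by unfold Pre_find_reshape_factors_py; infer_instance

def pvWitness_find_reshape_factors_py : Int × Int := (12, 5)

def Spec_find_reshape_factors_py (batch_length : Int) (min_first_dim : Int) (out : Int × Int) : Prop := out = find_reshape_factors_py_alt batch_length min_first_dim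
instance (batch_length : Int) (min_first_dim : Int) (out : Int × Int) : Decidable (Spec_find_reshape_factors_py batch_length min_first_dim out) := by unfold Spec_find_reshape_factors_py; infer_instance

-- ===== CLAIM (what is proved, stated in full; the proofs are below) =====
def Claim_equal_find_reshape_factors_py : Prop := ∀ (batch_length : Int) (min_first_dim : Int), Dom_find_reshape_factors_py batch_length min_first_dim → Pre_find_reshape_factors_py batch_length min_first_dim → Spec_find_reshape_factors_py batch_length min_first_dim (find_reshape_factors_py batch_length min_first_dim)

-- ===== LEMMAS AND PROOFS =====

-- In a strictly ascending list, find? returns d as soon as d is a member satisfying p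
-- that is ≤ every member satisfying p.
theorem pv_find?_eq_some_min {L : List Int} {p : Int → Bool} {d : Int}
    (hs : L.Pairwise (· < ·)) (hd : d ∈ L) (hpd : p d = true)
    (hmin : ∀ e ∈ L, p e = true → d ≤ e) : L.find? p = some d := by
  induction L with
  | nil => cases hd
  | cons a t ih =>
    rcases List.mem_cons.mp hd with rfl | hdt
    · simp [List.find?, hpd]
    · have had : a < d := (List.pairwise_cons.mp hs).1 d hdt
      have hpa : p a = false := by
        cases h : p a
        · rfl
        · exact absurd (hmin a (List.mem_cons_self) h) (by omega)
      simp only [List.find?, hpa]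
      exact ih (List.pairwise_cons.mp hs).2 hdt
        (fun e he hpe => hmin e (List.mem_cons_of_mem a he) hpe)

-- In a strictly descending list, find? returns d as soon as d is a member satisfying p
-- that is ≥ every member satisfying p.
theorem pv_find?_eq_some_max {L : List Int} {p : Int → Bool} {d : Int}
    (hs : L.Pairwise (· > ·)) (hd : d ∈ L) (hpd : p d = true)
    (hmax : ∀ e ∈ L, p e = true → e ≤ d) : L.find? p = some d := by
  induction L with
  | nil => cases hd
  | cons a t ih =>
    rcases List.mem_cons.mp hd with rfl | hdt
    · simp [List.find?, hpd]
    · have had : d < a := (List.pairwise_cons.mp hs).1 d hdt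
      have hpa : p a = false := by
        cases h : p a
        · rfl
        · exact absurd (hmax a (List.mem_cons_self) h) (by omega)
      simp only [List.find?, hpa]
      exact ih (List.pairwise_cons.mp hs).2 hdt
        (fun e he hpe => hmax e (List.mem_cons_of_mem a he) hpe)

-- In a strictly ascending list, the element find? returns is minimal among members satisfying p.
theorem pv_find?_some_le {L : List Int} {p : Int → Bool} {d : Int}
    (hs : L.Pairwise (· < ·)) (hf : L.find? p = some d) :
    ∀ e ∈ L, p e = true → d ≤ e := by
  induction L with
  | nil => simp at hf
  | cons a t ih =>
    intro e he hpe
    rcases h : p a with _ | _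
    · simp only [List.find?, h] at hf
      rcases List.mem_cons.mp he with rfl | het
      · simp [hpe] at h
      · exact ih (List.pairwise_cons.mp hs).2 hf e het hpe
    · simp only [List.find?, h, Option.some.injEq] at hf
      subst hf
      rcases List.mem_cons.mp he with rfl | het
      · exact le_refl _
      · exact le_of_lt ((List.pairwise_cons.mp hs).1 e het)

-- In a strictly ascending list, the last element is the maximal member.
theorem pv_getLast?_eq_of_max {L : List Int} {x : Int}
    (hs : L.Pairwise (· < ·)) (hx : x ∈ L) (hmax : ∀ e ∈ L, e ≤ x) :
    L.getLast? = some x := by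
  induction L with
  | nil => cases hx
  | cons a t ih =>
    cases t with
    | nil =>
      rcases List.mem_cons.mp hx with rfl | h
      · rfl
      · cases h
    | cons b u =>
      rw [List.getLast?_cons_cons]
      have hax : a < x ∨ a = x := by
        rcases List.mem_cons.mp hx with rfl | hxt
        · exact Or.inr rfl
        · exact Or.inl ((List.pairwise_cons.mp hs).1 x hxt)
      have hxt : x ∈ b :: u := by
        rcases List.mem_cons.mp hx with rfl | hxt
        · -- x = a is the head; but b ∈ tail has a < b and b ≤ x = a: contradiction
          have hab : x < b := (List.pairwise_cons.mp hs).1 b List.mem_cons_self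
          have hbx : b ≤ x := hmax b (List.mem_cons_of_mem _ List.mem_cons_self)
          omega
        · exact hxt
      exact ih (List.pairwise_cons.mp hs).2 hxt
        (fun e he => hmax e (List.mem_cons_of_mem a he))

-- pyRange with step -1 is strictly descending.
theorem pv_pairwise_gt_pyRange_neg_one (a b : Int) :
    (PySem.List.pyRange a b (-1)).Pairwise (· > ·) := by
  rw [PySem.List.pyRange_neg_one_eq_reverse]
  rw [List.pairwise_reverse]
  exact PySem.List.pairwise_lt_pyRange_one _ _

-- The elements collected by A's factor loop are exactly the positive divisors of bl,
-- for any s with s*s ≤ bl < (s+1)*(s+1) and 1 ≤ bl.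
theorem pv_mem_factors {bl s : Int} (hbl : 1 ≤ bl)
    (hs1 : s * s ≤ bl) (hs2 : bl < (s + 1) * (s + 1)) (x : Int) :
    x ∈ ((PySem.List.pyRange 1 (s + 1) 1).foldl
      (fun acc i =>
        if PySem.Int.mod bl i = 0 then acc ++ [i, PySem.Int.floordiv bl i] else acc) [])
      ↔ (1 ≤ x ∧ x ∣ bl) := by
  have hfun : (fun (acc : List Int) i =>
      if PySem.Int.mod bl i = 0 then acc ++ [i, PySem.Int.floordiv bl i] else acc)
      = (fun acc i => acc ++ (if PySem.Int.mod bl i = 0 then [i, PySem.Int.floordiv bl i] else [])) := by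
    funext acc i; split <;> simp
  rw [hfun, PySem.List.foldl_append_eq_flatMap]
  simp only [List.nil_append, List.mem_flatMap, PySem.List.mem_pyRange_one]
  constructor
  · rintro ⟨i, ⟨hi1, hi2⟩, hx⟩
    split at hx
    case isTrue hdvd =>
      have hidvd : i ∣ bl := (PySem.Int.mod_eq_zero_iff_dvd bl i).mp hdvd
      have hipos : 0 < i := by omega
      rw [PySem.Int.floordiv_eq_ediv_of_pos hipos] at hx
      simp only [List.mem_cons, List.not_mem_nil, or_false] at hx
      rcases hx with rfl | rfl
      · exact ⟨hi1, hidvd⟩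
      · 
        have hmul : bl / i * i = bl := Int.ediv_mul_cancel hidvd
        refine ⟨?_, ⟨i, hmul.symm⟩⟩
        have hibl : i ≤ bl := Int.le_of_dvd (by omega) hidvd
        have := (Int.le_ediv_iff_mul_le hipos (a := 1) (b := bl)).mpr (by omega)
        omega
    case isFalse => simp at hx
  · rintro ⟨hx1, hdvd⟩
    have hxbl : x ≤ bl := Int.le_of_dvd (by omega) hdvd
    by_cases hxs : x ≤ s
    · refine ⟨x, ⟨hx1, by omega⟩, ?_⟩
      rw [if_pos ((PySem.Int.mod_eq_zero_iff_dvd bl x).mpr hdvd)]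
      simp
    · -- x > s: x appears as the complement of i = bl / x
      have hxs' : s < x := by omega
      have hxpos : 0 < x := by omega
      have hmul : bl / x * x = bl := Int.ediv_mul_cancel hdvd
      set i := bl / x with hi
      have hi1 : 1 ≤ i := by nlinarith [hxs']
      have his : i ≤ s := by nlinarith [hxs']
      have hidvd : i ∣ bl := ⟨x, hmul.symm⟩
      refine ⟨i, ⟨hi1, by omega⟩, ?_⟩
      rw [if_pos ((PySem.Int.mod_eq_zero_iff_dvd bl i).mpr hidvd)]
      have hfd : PySem.Int.floordiv bl i = x := by
        rw [PySem.Int.floordiv_eq_ediv_of_pos (by omega)]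
        rw [← hmul]
        exact Int.mul_ediv_cancel_left x (by omega)
      rw [hfd]; simp

-- main equivalence on the precondition
theorem pv_main (bl m : Int) (hbl0 : 0 ≤ bl) (hne : bl ≠ 0 ∨ m ≠ 0) :
    find_reshape_factors_py bl m = find_reshape_factors_py_alt bl m := by
  by_cases hbl : bl = 0
  · -- batch_length = 0: both fall through to (m, 0 // m)
    subst hbl
    have hm : m ≠ 0 := by tauto
    have hA : find_reshape_factors_py 0 m = (m, PySem.Int.floordiv 0 m) := by
      simp only [find_reshape_factors_py]
      rw [show ((Int.toNat 0).sqrt : Int) + 1 = 1 by norm_num]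
      rw [PySem.List.pyRange_one_eq_nil (by omega)]
      have hnil : (PySem.List.sorted ([] : List Int) fun f => f) = [] := rfl
      simp [hnil, PySem.Int.mod_eq_zero_iff_dvd]
    have hB : find_reshape_factors_py_alt 0 m = (m, PySem.Int.floordiv 0 m) := by
      simp only [find_reshape_factors_py_alt]
      rw [if_neg (by omega : ¬ (0:Int) < 0)]
      rw [PySem.List.pyRange_one_eq_nil (by omega : (0:Int) + 1 ≤ max m 1)]
      simp [PySem.Int.mod_eq_zero_iff_dvd]
    rw [hA, hB]
  · have hbl1 : 1 ≤ bl := by omega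
    simp only [find_reshape_factors_py, find_reshape_factors_py_alt,
      if_pos (show (0:Int) < bl by omega)]
    set s : Int := (bl.toNat.sqrt : Int) with hsdef
    have hs0 : 0 ≤ s := by positivity
    have hs1 : s * s ≤ bl := by
      have h := Nat.sqrt_le' bl.toNat
      have hc : ((bl.toNat : Int)) = bl := Int.toNat_of_nonneg hbl0
      rw [hsdef]
      nlinarith [h, hc, sq_nonneg ((bl.toNat.sqrt : Int))]
    have hs2 : bl < (s + 1) * (s + 1) := by
      have h := Nat.lt_succ_sqrt' bl.toNat
      have hc : ((bl.toNat : Int)) = bl := Int.toNat_of_nonneg hbl0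
      rw [hsdef]
      nlinarith [h, hc]
    have hsle : s ≤ bl := by nlinarith [mul_self_nonneg (s - 1)]
    have hs_ge1 : 1 ≤ s := by
      have hp : 0 < bl.toNat.sqrt := Nat.sqrt_pos.mpr (by omega)
      omega
    set F : List Int := (PySem.List.pyRange 1 (s + 1) 1).foldl
      (fun acc i =>
        if PySem.Int.mod bl i = 0 then acc ++ [i, PySem.Int.floordiv bl i] else acc) []
      with hFdef
    set L : List Int := PySem.List.sorted (PySem.Set.ofList F) (fun f => f) with hLdef
    have hLp : L.Pairwise (· < ·) := PySem.List.sorted_ofList_pairwise_lt F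
    have hLmem : ∀ x, x ∈ L ↔ (1 ≤ x ∧ x ∣ bl) := by
      intro x
      rw [hLdef]
      rw [(PySem.List.sorted_perm (PySem.Set.ofList F) _ false).mem_iff]
      rw [PySem.Set.mem_ofList F x]
      rw [hFdef]
      exact pv_mem_factors hbl1 hs1 hs2 x
    rcases hfind : L.find? (fun f => decide (m ≤ f)) with _ | d
    · -- no divisor ≥ m at all, so bl < m
      have hnone := List.find?_eq_none.mp hfind
      have hblm : bl < m := by
        have hb : bl ∈ L := (hLmem bl).mpr ⟨hbl1, dvd_refl bl⟩
        have := hnone bl hb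
        simp at this
        omega
      -- A side: m does not divide bl (bl % m = bl ≠ 0), last factor is bl
      have hmodm : PySem.Int.mod bl m = bl := by
        rw [PySem.Int.mod_eq_emod_of_pos (by omega)]
        exact Int.emod_eq_of_lt hbl0 hblm
      have hlast : PySem.List.pyGet? L (-1) = some bl := by
        rw [PySem.List.pyGet?_neg_one]
        exact pv_getLast?_eq_of_max hLp ((hLmem bl).mpr ⟨hbl1, dvd_refl bl⟩)
          (fun e he => Int.le_of_dvd (by omega) ((hLmem e).mp he).2)
      -- B side: first loop range is empty of members, second loop cap is 0
      have h1 : (PySem.List.pyRange (max m 1) (s + 1) 1).find?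
          (fun i => PySem.Int.mod bl i == 0) = none := by
        rw [List.find?_eq_none]
        intro e he _
        obtain ⟨he1, he2⟩ := PySem.List.mem_pyRange_one.mp he
        omega
      have hcap0 : PySem.Int.floordiv bl m = 0 := by
        rw [PySem.Int.floordiv_eq_ediv_of_pos (by omega)]
        exact Int.ediv_eq_zero_of_lt hbl0 hblm
      dsimp only
      rw [h1, hcap0, min_eq_right hs0, PySem.List.pyRange_neg_one_eq_nil (le_refl 0)]
      rw [if_pos (⟨by omega, hbl1⟩ : (2 ≤ m ∧ 1 ≤ bl))]
      simp only [List.find?_nil, hmodm, if_neg hbl]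
      rw [hlast]
      dsimp only
      rw [PySem.Int.floordiv_eq_ediv_of_pos (by omega : 0 < bl), Int.ediv_self hbl]
    · -- d is the least divisor of bl that is ≥ m
      dsimp only
      have hdL : d ∈ L := List.mem_of_find?_eq_some hfind
      have hmd : m ≤ d := by have := List.find?_some hfind; simpa using this
      obtain ⟨hd1, hddvd⟩ := (hLmem d).mp hdL
      have hdmin : ∀ e, 1 ≤ e → e ∣ bl → m ≤ e → d ≤ e := by
        intro e he1 hedvd hme
        exact pv_find?_some_le hLp hfind e ((hLmem e).mpr ⟨he1, hedvd⟩) (by simpa)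
      have hdbl : d ≤ bl := Int.le_of_dvd (by omega) hddvd
      by_cases hds : d ≤ s
      · -- found in B's first (ascending) loop
        have h1 : (PySem.List.pyRange (max m 1) (s + 1) 1).find?
            (fun i => PySem.Int.mod bl i == 0) = some d := by
          apply pv_find?_eq_some_min (PySem.List.pairwise_lt_pyRange_one _ _)
          · exact PySem.List.mem_pyRange_one.mpr ⟨by omega, by omega⟩
          · simp [PySem.Int.mod_eq_zero_iff_dvd, hddvd]
          · intro e he hpe
            obtain ⟨he1, he2⟩ := PySem.List.mem_pyRange_one.mp he
            simp only [beq_iff_eq, PySem.Int.mod_eq_zero_iff_dvd] at hpe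
            exact hdmin e (by omega) hpe (by omega)
        rw [h1]
      · -- d > sqrt: found in B's second (descending) loop as complement of c = bl / d
        have hsd : s < d := by omega
        have h1 : (PySem.List.pyRange (max m 1) (s + 1) 1).find?
            (fun i => PySem.Int.mod bl i == 0) = none := by
          rw [List.find?_eq_none]
          intro e he hpe
          obtain ⟨he1, he2⟩ := PySem.List.mem_pyRange_one.mp he
          simp only [beq_iff_eq, PySem.Int.mod_eq_zero_iff_dvd] at hpe
          have := hdmin e (by omega) hpe (by omega)
          omega
        rw [h1]
        dsimp only
        have hm2 : 2 ≤ m := by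
          by_contra hm2
          have := hdmin 1 le_rfl (one_dvd bl) (by omega)
          omega
        rw [if_pos ⟨hm2, hbl1⟩]
        have hdpos : 0 < d := by omega
        have hmul : bl / d * d = bl := Int.ediv_mul_cancel hddvd
        set c : Int := bl / d with hcdef
        have hc1 : 1 ≤ c := by nlinarith
        have hcs : c ≤ s := by nlinarith
        have hcdvd : c ∣ bl := ⟨d, hmul.symm⟩
        have hcap : c ≤ PySem.Int.floordiv bl m := by
          rw [PySem.Int.floordiv_eq_ediv_of_pos (by omega)]
          rw [Int.le_ediv_iff_mul_le (by omega)]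
          nlinarith
        have h2 : (PySem.List.pyRange (min s (PySem.Int.floordiv bl m)) 0 (-1)).find?
            (fun c => PySem.Int.mod bl c == 0) = some c := by
          apply pv_find?_eq_some_max (pv_pairwise_gt_pyRange_neg_one _ _)
          · exact PySem.List.mem_pyRange_neg_one.mpr ⟨by omega, by omega⟩
          · simp [PySem.Int.mod_eq_zero_iff_dvd, hcdvd]
          · intro e he hpe
            obtain ⟨he1, he2⟩ := PySem.List.mem_pyRange_neg_one.mp he
            simp only [beq_iff_eq, PySem.Int.mod_eq_zero_iff_dvd] at hpe
            have hecap : e ≤ PySem.Int.floordiv bl m := by omega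
            rw [PySem.Int.floordiv_eq_ediv_of_pos (by omega)] at hecap
            have heml : e * m ≤ bl := (Int.le_ediv_iff_mul_le (by omega)).mp hecap
            have hfmul : bl / e * e = bl := Int.ediv_mul_cancel hpe
            have hmf : m ≤ bl / e := by
              rw [Int.le_ediv_iff_mul_le (by omega)]
              nlinarith
            have hf1 : 1 ≤ bl / e := by omega
            have hdf : d ≤ bl / e := hdmin _ hf1 ⟨e, hfmul.symm⟩ hmf
            nlinarith [hfmul]
        rw [h2]
        dsimp only
        have hfdc : PySem.Int.floordiv bl c = d := by
          rw [PySem.Int.floordiv_eq_ediv_of_pos (by omega)]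
          rw [show bl = c * d by nlinarith]
          exact Int.mul_ediv_cancel_left d (by omega)
        have hfdd : PySem.Int.floordiv bl d = c := by
          rw [PySem.Int.floordiv_eq_ediv_of_pos (by omega)]
        rw [hfdc, hfdd]

-- ===== VERDICT (by name: the statement is the Claim_ definition above) =====
theorem find_reshape_factors_py_spec : Claim_equal_find_reshape_factors_py := by
  intro bl m _ hpre
  exact pv_main bl m hpre.1 hpre.2
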